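-- pv_equiv track=rewrite | github.com/redoop/riscv-ai-accelerator | chisel/synthesis/waves/wave_viewer.py | _compress_values
-- ===== SOURCE A (Python) =====
-- def _compress_values(values):
--     """压缩值序列 - 移除冗余的中间点"""
--     if len(values) <= 2:
--         return values
--
--     compressed = [values[0]]
--
--     for i in range(1, len(values) - 1):
--         # 保留值变化点
--         if values[i]['value'] != values[i-1]['value'] or values[i]['value'] != values[i+1]['value']:
--             compressed.append(values[i])
--
--     compressed.append(values[-1])
--     return compressed
-- ===== SOURCE B (Python) =====
-- def _compress_values(values):
--     """压缩值序列 - 移除冗余的中间点"""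
--     if len(values) <= 2:
--         return values
--     return _emit_runs(values)
--
--
-- def _emit_runs(vs):
--     """Emit the first and (if longer than one) last element of each maximal
--     run of equal 'value', recursively over the remaining runs."""
--     if not vs:
--         return []
--     key = vs[0]['value']
--     j = 1
--     while j < len(vs) and vs[j]['value'] == key:
--         j += 1
--     run, rest = vs[:j], vs[j:]
--     out = [run[0]]
--     if len(run) > 1:
--         out.append(run[-1])
--     return out + _emit_runs(rest)
-- ===== Notes on version B (the rewrite author's own statement) =====
-- stated objective: alternative
-- what changed: Replaces the index loop comparing each interior element with both neighbours by a recursive pass over maximal runs of equal 'value' that emits each run's first and (when longer than one) last element.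
import Mathlib
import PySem

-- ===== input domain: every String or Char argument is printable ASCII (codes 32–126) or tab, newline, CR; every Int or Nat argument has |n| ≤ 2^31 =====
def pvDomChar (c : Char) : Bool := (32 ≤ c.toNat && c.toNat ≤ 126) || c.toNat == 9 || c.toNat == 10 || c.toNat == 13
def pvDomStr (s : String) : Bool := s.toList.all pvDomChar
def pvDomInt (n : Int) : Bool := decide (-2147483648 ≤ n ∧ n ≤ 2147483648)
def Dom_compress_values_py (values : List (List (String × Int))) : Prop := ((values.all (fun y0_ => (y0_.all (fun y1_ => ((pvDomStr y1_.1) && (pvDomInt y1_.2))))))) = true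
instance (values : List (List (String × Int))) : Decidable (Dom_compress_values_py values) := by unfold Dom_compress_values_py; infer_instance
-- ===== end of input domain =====

-- B re-implements the neighbour-comparison index loop as a recursive pass over maximal
-- runs of equal 'value', emitting each run's first and (when longer) last element; the
-- equivalence proved is about the return value (neither version mutates its argument).

-- ===== PORT A =====
-- v['value'] as both Pythons read it (dict lookup; default 0 is never read inside Pre_,
-- which guarantees the key is present wherever the loop dereferences it)
def pvVal (d : List (String × Int)) : Int := (PySem.Dict.mk d).getD "value" 0

def compress_values_py (values : List (List (String × Int))) : List (List (String × Int)) :=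
  if values.length ≤ 2 then values
  else
    let compressed :=
      (PySem.List.pyRange 1 ((values.length : Int) - 1) 1).foldl
        (fun acc i =>
          if pvVal (PySem.List.pyGetD values i []) ≠ pvVal (PySem.List.pyGetD values (i - 1) []) ∨
             pvVal (PySem.List.pyGetD values i []) ≠ pvVal (PySem.List.pyGetD values (i + 1) []) then
            acc ++ [PySem.List.pyGetD values i []]
          else acc)
        [PySem.List.pyGetD values 0 []]
    compressed ++ [PySem.List.pyGetD values (-1) []]

-- ===== PORT B =====
-- the 'while j < len(vs) and vs[j]['value'] == key' scan of Source B: splits off the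
-- longest prefix whose 'value' equals k, returning (run-after-head, rest)
def pvTakeRun (k : Int) : List (List (String × Int)) → List (List (String × Int)) × List (List (String × Int))
  | [] => ([], [])
  | d :: rest =>
    if pvVal d = k then
      let p := pvTakeRun k rest
      (d :: p.1, p.2)
    else ([], d :: rest)

theorem pvTakeRun_snd_length_le (k : Int) (vs : List (List (String × Int))) :
    (pvTakeRun k vs).2.length ≤ vs.length := by
  induction vs with
  | nil => simp [pvTakeRun]
  | cons d rest ih =>
    simp only [pvTakeRun]
    split
    · simpa using Nat.le_succ_of_le ih
    · simp

def pvEmitRuns : List (List (String × Int)) → List (List (String × Int))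
  | [] => []
  | d :: vs =>
    let p := pvTakeRun (pvVal d) vs
    let out := if h : p.1 = [] then [d] else [d, p.1.getLast h]
    out ++ pvEmitRuns p.2
  termination_by vs => vs.length
  decreasing_by
    exact Nat.lt_succ_of_le (pvTakeRun_snd_length_le _ _)

def compress_values_py_alt (values : List (List (String × Int))) : List (List (String × Int)) :=
  if values.length ≤ 2 then values
  else pvEmitRuns values

-- ===== PRECONDITION & SPEC =====
-- Pre_ excludes the inputs of length ≥ 3 in which some element lacks the key "value":
-- there Python A raises KeyError, except when its or-condition short-circuits past a
-- keyless later element and A still returns — B's run scan raises KeyError on those too.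
def Pre_compress_values_py (values : List (List (String × Int))) : Prop :=
  values.length ≤ 2 ∨ ∀ d ∈ values, ((PySem.Dict.mk d).get? "value").isSome = true

instance (values : List (List (String × Int))) : Decidable (Pre_compress_values_py values) := by
  unfold Pre_compress_values_py; infer_instance

def pvWitness_compress_values_py : (List (List (String × Int))) :=
  [[("value", 0)], [("value", 0)], [("value", 1)]]

def Spec_compress_values_py (values : List (List (String × Int))) (out : List (List (String × Int))) : Prop := out = compress_values_py_alt values
instance (values : List (List (String × Int))) (out : List (List (String × Int))) : Decidable (Spec_compress_values_py values out) := by unfold Spec_compress_values_py; infer_instance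

-- ===== CLAIM (what is proved, stated in full; the proofs are below) =====
def Claim_equal_compress_values_py : Prop := ∀ (values : List (List (String × Int))), Dom_compress_values_py values → Pre_compress_values_py values → Spec_compress_values_py values (compress_values_py values)

-- ===== LEMMAS AND PROOFS =====

-- common characterisation: keep an interior element iff it differs from a neighbour
def pvAux (prev : List (String × Int)) : List (List (String × Int)) → List (List (String × Int))
  | [] => []
  | [x] => [x]
  | x :: y :: t =>
    (if pvVal x ≠ pvVal prev ∨ pvVal x ≠ pvVal y then [x] else []) ++ pvAux x (y :: t)

theorem pvAux_ne {prev y : List (String × Int)} (t : List (List (String × Int)))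
    (h : pvVal y ≠ pvVal prev) : pvAux prev (y :: t) = y :: pvAux y t := by
  cases t with
  | nil => simp [pvAux]
  | cons z t' => simp [pvAux, h]

theorem pvTakeRun_append (k : Int) (vs : List (List (String × Int))) :
    (pvTakeRun k vs).1 ++ (pvTakeRun k vs).2 = vs := by
  induction vs with
  | nil => simp [pvTakeRun]
  | cons d rest ih =>
    simp only [pvTakeRun]
    split
    · simpa using ih
    · simp

theorem pvTakeRun_fst_all (k : Int) (vs : List (List (String × Int))) :
    ∀ x ∈ (pvTakeRun k vs).1, pvVal x = k := by
  induction vs with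
  | nil => simp [pvTakeRun]
  | cons d rest ih =>
    simp only [pvTakeRun]
    split
    · next h =>
      intro x hx
      simp only [List.mem_cons] at hx
      rcases hx with rfl | hx
      · exact h
      · exact ih x hx
    · simp

theorem pvTakeRun_snd_head (k : Int) (vs : List (List (String × Int)))
    {y : List (String × Int)} {t : List (List (String × Int))}
    (h : (pvTakeRun k vs).2 = y :: t) : pvVal y ≠ k := by
  induction vs with
  | nil => simp [pvTakeRun] at h
  | cons d rest ih =>
    simp only [pvTakeRun] at h
    split at h
    · exact ih h
    · next hne => cases h; simpa using hne

theorem pvAux_run (run : List (List (String × Int))) (prev : List (String × Int))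
    (rest' : List (List (String × Int))) (h : run ≠ [])
    (hall : ∀ x ∈ run, pvVal x = pvVal prev)
    (hhd : ∀ y t, rest' = y :: t → pvVal y ≠ pvVal prev) :
    pvAux prev (run ++ rest') = run.getLast h :: pvAux (run.getLast h) rest' := by
  induction run generalizing prev with
  | nil => exact absurd rfl h
  | cons m rt ih =>
    have hm : pvVal m = pvVal prev := hall m (by simp)
    cases rt with
    | nil =>
      cases rest' with
      | nil => simp [pvAux]
      | cons y t =>
        have hy : pvVal y ≠ pvVal prev := hhd y t rfl
        have : pvVal m ≠ pvVal y := by rw [hm]; exact fun hc => hy hc.symm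
        simp [pvAux, this]
    | cons m2 rt' =>
      have hm2 : pvVal m2 = pvVal prev := hall m2 (by simp)
      have h1 : ¬ (pvVal m ≠ pvVal prev ∨ pvVal m ≠ pvVal m2) := by
        push Not
        exact ⟨hm, hm.trans hm2.symm⟩
      have hall' : ∀ x ∈ m2 :: rt', pvVal x = pvVal m := by
        intro x hx
        rw [hm]
        exact hall x (List.mem_cons_of_mem _ hx)
      have hhd' : ∀ y t, rest' = y :: t → pvVal y ≠ pvVal m := by
        intro y t ht
        rw [hm]
        exact hhd y t ht
      have hih := ih m (List.cons_ne_nil _ _) hall' hhd'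
      simp [pvAux, h1, List.getLast_cons]
      simpa using hih

-- Claim B: pvEmitRuns agrees with pvAux
theorem pvEmitRuns_eq (n : Nat) : ∀ (vs : List (List (String × Int))) (d : List (String × Int)),
    vs.length ≤ n → pvEmitRuns (d :: vs) = d :: pvAux d vs := by
  induction n with
  | zero =>
    intro vs d h
    have hvs : vs = [] := List.eq_nil_of_length_eq_zero (Nat.le_zero.mp h)
    subst hvs
    rw [pvEmitRuns]
    simp [pvTakeRun, pvAux, pvEmitRuns]
  | succ n ih =>
    intro vs d hlen
    rw [pvEmitRuns]
    have happ := pvTakeRun_append (pvVal d) vs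
    by_cases hp1 : (pvTakeRun (pvVal d) vs).1 = []
    · have hp2 : (pvTakeRun (pvVal d) vs).2 = vs := by
        rw [hp1] at happ; simpa using happ
      simp only [hp1, dif_pos, hp2]
      cases vs with
      | nil => simp [pvAux, pvEmitRuns]
      | cons y t =>
        have hy : pvVal y ≠ pvVal d := pvTakeRun_snd_head (pvVal d) (y :: t) hp2
        have ht : t.length ≤ n := by simpa using Nat.lt_succ_iff.mp (by simpa using hlen)
        rw [ih t y ht, pvAux_ne t hy]
        simp
    · simp only [dif_neg hp1]
      set L := (pvTakeRun (pvVal d) vs).1.getLast hp1 with hL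
      have hLmem : L ∈ (pvTakeRun (pvVal d) vs).1 := List.getLast_mem hp1
      have hLval : pvVal L = pvVal d := pvTakeRun_fst_all (pvVal d) vs L hLmem
      have haux : pvAux d vs = L :: pvAux L (pvTakeRun (pvVal d) vs).2 := by
        conv_lhs => rw [← happ]
        exact pvAux_run _ d _ hp1 (fun x hx => pvTakeRun_fst_all (pvVal d) vs x hx)
          (fun y t ht => pvTakeRun_snd_head (pvVal d) vs ht)
      rw [haux]
      cases h2 : (pvTakeRun (pvVal d) vs).2 with
      | nil => simp [pvAux, pvEmitRuns]
      | cons y t =>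
        have hy : pvVal y ≠ pvVal L := by
          rw [hLval]
          exact pvTakeRun_snd_head (pvVal d) vs h2
        have ht : t.length ≤ n := by
          have h1 : 1 ≤ (pvTakeRun (pvVal d) vs).1.length := by
            cases hne : (pvTakeRun (pvVal d) vs).1 with
            | nil => exact absurd hne hp1
            | cons a b => simp
          have := congrArg List.length happ
          simp [h2] at this
          omega
        rw [ih t y ht, pvAux_ne t hy]
        simp

-- vs.getD (m+k) reads the k-th element of a known drop
theorem pvGetD_drop_eq {α : Type} [Inhabited α] (vs w : List α) (m : Nat)
    (h : vs.drop m = w) (k : Nat) (hk : k < w.length) (dflt : α) :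
    vs.getD (m + k) dflt = w[k] := by
  have : vs[m + k]? = some w[k] := by
    rw [← List.getElem?_drop, h]
    exact List.getElem?_eq_getElem hk
  simp [List.getD, this]

theorem pvFold_eq (vs : List (List (String × Int))) :
    ∀ (xs : List (List (String × Int))) (prev : List (String × Int)) (s : Nat)
      (acc : List (List (String × Int))),
      1 ≤ s → vs.drop (s - 1) = prev :: xs → xs ≠ [] →
      ((PySem.List.pyRange (s : Int) ((vs.length : Int) - 1) 1).foldl
        (fun acc i =>
          if pvVal (PySem.List.pyGetD vs i []) ≠ pvVal (PySem.List.pyGetD vs (i - 1) []) ∨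
             pvVal (PySem.List.pyGetD vs i []) ≠ pvVal (PySem.List.pyGetD vs (i + 1) []) then
            acc ++ [PySem.List.pyGetD vs i []]
          else acc)
        acc) ++ [PySem.List.pyGetD vs (-1) []] = acc ++ pvAux prev xs := by
  intro xs
  induction xs with
  | nil => intro prev s acc _ _ hne; exact absurd rfl hne
  | cons x xs' ih =>
    intro prev s acc hs hdrop hne
    have hdlen := congrArg List.length hdrop
    simp only [List.length_drop, List.length_cons] at hdlen
    cases xs' with
    | nil =>
      -- xs = [x]: the range is empty and values[-1] = x
      have hlen : vs.length = s + 1 := by simp at hdlen; omega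
      have hrange : PySem.List.pyRange (s : Int) ((vs.length : Int) - 1) 1 = [] := by
        apply PySem.List.pyRange_one_eq_nil
        omega
      have hidx : vs[(s - 1) + 1]? = some x := by
        rw [← List.getElem?_drop, hdrop]; rfl
      have hs1 : (s - 1) + 1 = vs.length - 1 := by omega
      rw [hs1] at hidx
      rw [hrange]
      rw [PySem.List.pyGetD_neg_ofNat vs 1 [] (by omega) (by omega)]
      rw [List.getElem?_eq_getElem (by omega)] at hidx
      simp only [Option.some.injEq] at hidx
      simp [pvAux, hidx]
    | cons y t =>
      -- xs = x :: y :: t: peel index s off the range and step once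
      have hslt : (s : Int) < (vs.length : Int) - 1 := by
        simp at hdlen; omega
      rw [PySem.List.pyRange_one_cons hslt, List.foldl_cons]
      -- the three reads at indices s-1, s, s+1
      have hprev : PySem.List.pyGetD vs ((s : Int) - 1) [] = prev := by
        have h1 : (s : Int) - 1 = ((s - 1 : Nat) : Int) := by omega
        rw [h1, PySem.List.pyGetD_natCast]
        have := pvGetD_drop_eq vs (prev :: x :: y :: t) (s - 1) hdrop 0 (by simp) []
        simpa using this
      have hx : PySem.List.pyGetD vs ((s : Int)) [] = x := by
        rw [PySem.List.pyGetD_natCast]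
        have := pvGetD_drop_eq vs (prev :: x :: y :: t) (s - 1) hdrop 1 (by simp) []
        have hs1 : s - 1 + 1 = s := by omega
        rw [hs1] at this
        simpa using this
      have hy : PySem.List.pyGetD vs ((s : Int) + 1) [] = y := by
        have h1 : (s : Int) + 1 = ((s + 1 : Nat) : Int) := by omega
        rw [h1, PySem.List.pyGetD_natCast]
        have := pvGetD_drop_eq vs (prev :: x :: y :: t) (s - 1) hdrop 2 (by simp) []
        have hs1 : s - 1 + 2 = s + 1 := by omega
        rw [hs1] at this
        simpa using this
      have hdrop' : vs.drop (s + 1 - 1) = x :: y :: t := by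
        have : vs.drop s = x :: y :: t := by
          have h1 : s = (s - 1) + 1 := by omega
          rw [h1, ← List.tail_drop, hdrop]
          rfl
        simpa using this
      have hih := ih x (s + 1) (if pvVal x ≠ pvVal prev ∨ pvVal x ≠ pvVal y
          then acc ++ [x] else acc) (by omega) hdrop' (by simp)
      rw [hprev, hx, hy]
      push_cast at hih
      rw [hih]
      simp only [pvAux]
      split
      · simp
      · simp

-- ===== VERDICT (by name: the statement is the Claim_ definition above) =====
theorem compress_values_py_spec : Claim_equal_compress_values_py := by
  intro values _ _
  unfold Spec_compress_values_py
  by_cases h : values.length ≤ 2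
  · simp [compress_values_py, compress_values_py_alt, h]
  · cases values with
    | nil => simp at h
    | cons v0 rest =>
      have hrest : rest ≠ [] := by
        intro hc; rw [hc] at h; simp at h
      rw [compress_values_py, compress_values_py_alt]
      simp only [if_neg h]
      rw [pvEmitRuns_eq rest.length rest v0 le_rfl]
      have hfold := pvFold_eq (v0 :: rest) rest v0 1 [PySem.List.pyGetD (v0 :: rest) 0 []]
        le_rfl (by simp) hrest
      simpa [PySem.List.pyGetD_zero_cons] using hfold
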